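-- pv_equiv track=rewrite | github.com/caizizhen/Cai_Agent | scripts/finalize_task.py | _insert_after_table_header
-- ===== SOURCE A (Python) =====
-- def _section_bounds(lines: list[str], title: str) -> tuple[int, int] | None:
--     starts: list[tuple[str, int]] = []
--     for idx, line in enumerate(lines):
--         if line.startswith("## "):
--             starts.append((line.strip(), idx))
--     for pos, (candidate, start) in enumerate(starts):
--         if candidate == title:
--             end = starts[pos + 1][1] if pos + 1 < len(starts) else len(lines)
--             return start, end
--     return None
--
-- def _insert_after_table_header(lines: list[str], title: str, row: str) -> list[str]:
--     bounds = _section_bounds(lines, title)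
--     if bounds is None:
--         lines.extend(["", title, "", row])
--         return lines
--     start, end = bounds
--     insert_at = end
--     for idx in range(start, end):
--         if lines[idx].startswith("|---"):
--             insert_at = idx + 1
--             break
--     if row in lines[start:end]:
--         return lines
--     return lines[:insert_at] + [row] + lines[insert_at:]
-- ===== SOURCE B (Python) =====
-- def _insert_after_table_header(lines: list[str], title: str, row: str) -> list[str]:
--     # Single streaming scan: find the section header, then in one forward pass
--     # find the section end and the first '|---' line. Mutates `lines` (extend)
--     # in the missing-section case, exactly like the original.
--     start = None
--     for i, line in enumerate(lines):
--         if line.startswith("## ") and line.strip() == title: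
--             start = i
--             break
--     if start is None:
--         lines.extend(["", title, "", row])
--         return lines
--     end = len(lines)
--     insert_at = None
--     for i in range(start + 1, len(lines)):
--         if lines[i].startswith("## "):
--             end = i
--             break
--         if insert_at is None and lines[i].startswith("|---"):
--             insert_at = i + 1
--     if insert_at is None:
--         insert_at = end
--     if row in lines[start:end]:
--         return lines
--     return lines[:insert_at] + [row] + lines[insert_at:]
-- ===== Notes on version B (the rewrite author's own statement) =====
-- stated objective: simpler
-- what changed: Replaces the two-phase approach (materialize a list of all '## ' header positions, then iterate that list with lookahead to locate the section and its end, then a separate indexed loop for the '|---' line) with a direct streaming scan: one pass finds the first matching header, one forward pass from start+1 simultaneously finds the section end and the first '|---' line; no intermediate index list exists.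
import Mathlib
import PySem

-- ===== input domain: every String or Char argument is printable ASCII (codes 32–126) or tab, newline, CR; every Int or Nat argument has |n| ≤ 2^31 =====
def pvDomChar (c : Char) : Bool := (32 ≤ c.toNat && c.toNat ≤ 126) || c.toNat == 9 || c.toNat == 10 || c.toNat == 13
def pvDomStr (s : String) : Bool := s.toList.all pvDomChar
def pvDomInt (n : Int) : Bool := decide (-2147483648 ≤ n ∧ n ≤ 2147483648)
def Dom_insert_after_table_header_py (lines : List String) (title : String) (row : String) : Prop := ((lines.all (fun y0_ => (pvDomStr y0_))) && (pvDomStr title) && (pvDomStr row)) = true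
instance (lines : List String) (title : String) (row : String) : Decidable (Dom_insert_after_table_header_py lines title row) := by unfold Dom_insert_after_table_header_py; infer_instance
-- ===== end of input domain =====

-- B replaces A's two-phase search (build the list of all '## ' header positions, then scan
-- that list with lookahead) by one direct streaming scan; objective: simpler.
-- A mutates `lines` (extend) in the missing-section case; B performs the same mutation in
-- Python; the equivalence proved here is about the RETURN value.

-- ===== PORT A =====
-- the `starts.append(...)` loop of _section_bounds (idx kept as a Nat counter of enumerate)
def pvStartsAux : List String → Nat → List (String × Nat) → List (String × Nat)
  | [], _, acc => acc
  | l :: rest, idx, acc =>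
      pvStartsAux rest (idx + 1)
        (if PySem.Str.startswith l "## " then acc ++ [(PySem.Str.strip l, idx)] else acc)

-- the `for pos, (candidate, start) in enumerate(starts)` loop: starts[pos+1] is the head of the rest
def pvSbFind (llen : Nat) (title : String) : List (String × Nat) → Option (Nat × Nat)
  | [] => none
  | (cand, start) :: rest =>
      if cand = title then
        some (start, match rest with | [] => llen | (_, s2) :: _ => s2)
      else pvSbFind llen title rest

-- the `for idx in range(start, end)` loop (indices are in range, so getD is lines[idx] exactly)
def pvInsertAtLoop (lines : List String) (endv : Nat) : List Nat → Nat
  | [] => endv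
  | i :: rest =>
      if PySem.Str.startswith (lines.getD i "") "|---" then i + 1
      else pvInsertAtLoop lines endv rest

-- slices lines[start:end], lines[:k], lines[k:] have nonneg bounds here: take/drop is exact
def insert_after_table_header_py (lines : List String) (title : String) (row : String) : List String :=
  match pvSbFind lines.length title (pvStartsAux lines 0 []) with
  | none => lines ++ ["", title, "", row]
  | some (start, endv) =>
      let insert_at := pvInsertAtLoop lines endv (List.range' start (endv - start))
      if row ∈ (lines.drop start).take (endv - start) then lines
      else lines.take insert_at ++ [row] ++ lines.drop insert_at

-- ===== PORT B =====
-- first streaming pass: index of the first matching section header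
def pvFindStart (title : String) : List String → Nat → Option Nat
  | [], _ => none
  | l :: rest, i =>
      if PySem.Str.startswith l "## " && (PySem.Str.strip l == title) then some i
      else pvFindStart title rest (i + 1)

-- second pass (the `for i in range(start+1, len(lines))` loop of Source B, walking the tail):
-- returns (end, insert_at); `ins` is Source B's `insert_at` while still None/`some`
def pvScanTail : List String → Nat → Option Nat → Nat × Nat
  | [], i, ins => (i, ins.getD i)
  | l :: rest, i, ins =>
      if PySem.Str.startswith l "## " then (i, ins.getD i)
      else pvScanTail rest (i + 1)
        (if ins.isNone && PySem.Str.startswith l "|---" then some (i + 1) else ins)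

def insert_after_table_header_py_alt (lines : List String) (title : String) (row : String) : List String :=
  match pvFindStart title lines 0 with
  | none => lines ++ ["", title, "", row]
  | some start =>
      let p := pvScanTail (lines.drop (start + 1)) (start + 1) none
      if row ∈ (lines.drop start).take (p.1 - start) then lines
      else lines.take p.2 ++ [row] ++ lines.drop p.2

-- ===== PRECONDITION & SPEC =====
def Spec_insert_after_table_header_py (lines : List String) (title : String) (row : String) (out : List String) : Prop := out = insert_after_table_header_py_alt lines title row
instance (lines : List String) (title : String) (row : String) (out : List String) : Decidable (Spec_insert_after_table_header_py lines title row out) := by unfold Spec_insert_after_table_header_py; infer_instance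

-- ===== CLAIM (what is proved, stated in full; the proofs are below) =====
def Claim_equal_insert_after_table_header_py : Prop := ∀ (lines : List String) (title : String) (row : String), Dom_insert_after_table_header_py lines title row → Spec_insert_after_table_header_py lines title row (insert_after_table_header_py lines title row)

-- ===== LEMMAS AND PROOFS =====

-- spec helper: index of the first '## ' line of tl (indices starting at i), default d
def pvNhAux : List String → Nat → Nat → Nat
  | [], _, d => d
  | l :: rest, i, d => if PySem.Str.startswith l "## " then i else pvNhAux rest (i + 1) d

theorem pvStartsAux_acc (ls : List String) (idx : Nat) (acc : List (String × Nat)) :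
    pvStartsAux ls idx acc = acc ++ pvStartsAux ls idx [] := by
  induction ls generalizing idx acc with
  | nil => simp [pvStartsAux]
  | cons l rest ih =>
    cases hh : PySem.Str.startswith l "## " with
    | true =>
      simp only [pvStartsAux, hh, if_true]
      rw [ih (idx + 1) (acc ++ [(PySem.Str.strip l, idx)]),
          ih (idx + 1) ([] ++ [(PySem.Str.strip l, idx)])]
      simp
    | false =>
      simp only [pvStartsAux, hh, Bool.false_eq_true, if_false]
      exact ih (idx + 1) acc

theorem pvNhAux_min (tl : List String) (i d : Nat) : min i d ≤ pvNhAux tl i d := by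
  induction tl generalizing i with
  | nil => simp [pvNhAux]
  | cons l rest ih =>
    simp only [pvNhAux]
    split
    · omega
    · have h1 := ih (i + 1)
      omega

theorem pvNhAux_ge (tl : List String) (i d : Nat) (h : i ≤ d) : i ≤ pvNhAux tl i d := by
  have h1 := pvNhAux_min tl i d
  omega

theorem pvStarts_head (ls : List String) (off llen : Nat) :
    (match pvStartsAux ls off [] with
      | [] => llen
      | (_, s2) :: _ => s2) = pvNhAux ls off llen := by
  induction ls generalizing off with
  | nil => simp [pvStartsAux, pvNhAux]
  | cons l rest ih =>
    cases hh : PySem.Str.startswith l "## " with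
    | true =>
      simp only [pvStartsAux, pvNhAux, hh, if_true, List.nil_append]
      rw [pvStartsAux_acc rest (off + 1) [(PySem.Str.strip l, off)]]
      simp only [List.singleton_append]
    | false =>
      simp only [pvStartsAux, pvNhAux, hh, Bool.false_eq_true, if_false]
      exact ih (off + 1)

theorem pvFindStart_lt (ls : List String) (off s : Nat) (title : String)
    (h : pvFindStart title ls off = some s) :
    off ≤ s ∧ s - off < ls.length ∧
      ∃ l, ls[s - off]? = some l ∧ PySem.Str.startswith l "## " = true := by
  induction ls generalizing off with
  | nil => simp [pvFindStart] at h
  | cons l rest ih =>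
    simp only [pvFindStart] at h
    by_cases hc : (PySem.Str.startswith l "## " && (PySem.Str.strip l == title)) = true
    · rw [if_pos hc] at h
      obtain ⟨h1, _⟩ := Bool.and_eq_true_iff.mp hc
      injection h with h3
      subst h3
      exact ⟨Nat.le_refl _, by simp, l, by simp, h1⟩
    · rw [if_neg hc] at h
      obtain ⟨h1, h2, l', hl', hhdr⟩ := ih (off + 1) h
      refine ⟨by omega, by simp; omega, l', ?_, hhdr⟩
      have hss : s - off = (s - (off + 1)) + 1 := by omega
      rw [hss, List.getElem?_cons_succ]
      exact hl'

theorem pvSbFind_eq (ls : List String) (off llen : Nat) (title : String) :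
    pvSbFind llen title (pvStartsAux ls off []) =
      match pvFindStart title ls off with
      | none => none
      | some s => some (s, pvNhAux (ls.drop (s + 1 - off)) (s + 1) llen) := by
  induction ls generalizing off with
  | nil => simp [pvStartsAux, pvFindStart, pvSbFind]
  | cons l rest ih =>
    have hshift : ∀ s : Nat, off + 1 ≤ s →
        (l :: rest).drop (s + 1 - off) = rest.drop (s + 1 - (off + 1)) := by
      intro s hs
      have h2 : s + 1 - off = (s + 1 - (off + 1)) + 1 := by omega
      rw [h2, List.drop_succ_cons]
    cases hh : PySem.Str.startswith l "## " with
    | false =>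
      simp only [pvStartsAux, pvFindStart, hh, Bool.false_eq_true, if_false, Bool.false_and]
      rw [ih (off + 1)]
      cases hf : pvFindStart title rest (off + 1) with
      | none => rfl
      | some s =>
        obtain ⟨h1, -, -⟩ := pvFindStart_lt rest (off + 1) s title hf
        simp only []
        rw [hshift s h1]
    | true =>
      simp only [pvStartsAux, pvFindStart, hh, if_true, Bool.true_and, List.nil_append]
      rw [pvStartsAux_acc rest (off + 1) [(PySem.Str.strip l, off)]]
      simp only [List.singleton_append, pvSbFind]
      cases hbeq : (PySem.Str.strip l == title) with
      | true =>
        rw [if_pos (beq_iff_eq.mp hbeq), if_pos rfl]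
        simp only []
        have h1 : off + 1 - off = 1 := by omega
        rw [h1]
        simp only [List.drop_succ_cons, List.drop_zero]
        rw [pvStarts_head rest (off + 1) llen]
      | false =>
        rw [if_neg (by simpa using hbeq), if_neg (by simp)]
        rw [ih (off + 1)]
        cases hf : pvFindStart title rest (off + 1) with
        | none => rfl
        | some s =>
          obtain ⟨h1, -, -⟩ := pvFindStart_lt rest (off + 1) s title hf
          simp only []
          rw [hshift s h1]

theorem pvScanTail_fst (tl : List String) (i : Nat) (ins : Option Nat) :
    (pvScanTail tl i ins).1 = pvNhAux tl i (i + tl.length) := by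
  induction tl generalizing i ins with
  | nil => simp [pvScanTail, pvNhAux]
  | cons l rest ih =>
    simp only [pvScanTail, pvNhAux]
    split
    · rfl
    · rw [ih]
      congr 1
      simp only [List.length_cons]
      omega

theorem pvScanTail_some (tl : List String) (i j : Nat) :
    pvScanTail tl i (some j) = ((pvScanTail tl i none).1, j) := by
  induction tl generalizing i with
  | nil => simp [pvScanTail]
  | cons l rest ih =>
    cases hh : PySem.Str.startswith l "## " with
    | true =>
      simp only [pvScanTail]
      rw [if_pos hh, if_pos hh]
      rfl
    | false =>
      simp only [pvScanTail, hh, Bool.false_eq_true, if_false, Option.isNone_some,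
        Bool.false_and, Option.isNone_none, Bool.true_and]
      rw [ih (i + 1)]
      congr 1
      rw [pvScanTail_fst, pvScanTail_fst]

theorem pvScanTail_spec (lines : List String) (tl : List String) (i : Nat)
    (h : lines.drop i = tl) :
    pvScanTail tl i none =
      (pvNhAux tl i (i + tl.length),
       pvInsertAtLoop lines (pvNhAux tl i (i + tl.length))
         (List.range' i (pvNhAux tl i (i + tl.length) - i))) := by
  induction tl generalizing i with
  | nil => simp [pvScanTail, pvNhAux, pvInsertAtLoop]
  | cons l rest ih =>
    have hl : lines[i]? = some l := by
      have h0 : (List.drop i lines)[0]? = lines[i + 0]? := List.getElem?_drop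
      rw [h] at h0
      simpa using h0.symm
    have hgd : lines.getD i "" = l := by
      rw [List.getD_eq_getElem?_getD, hl]
      rfl
    cases hh : PySem.Str.startswith l "## " with
    | true =>
      have hnh : pvNhAux (l :: rest) i (i + (l :: rest).length) = i := by
        simp only [pvNhAux]
        rw [if_pos hh]
      rw [hnh]
      simp only [pvScanTail]
      rw [if_pos hh]
      simp [pvInsertAtLoop]
    | false =>
      have hdrop : lines.drop (i + 1) = rest := by
        have h1 : lines.drop (i + 1) = (lines.drop i).drop 1 := by
          rw [List.drop_drop]
        rw [h1, h]
        rfl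
      have hnh : pvNhAux (l :: rest) i (i + (l :: rest).length)
          = pvNhAux rest (i + 1) ((i + 1) + rest.length) := by
        simp only [pvNhAux, hh, Bool.false_eq_true, if_false, List.length_cons]
        congr 1
        omega
      rw [hnh]
      set e := pvNhAux rest (i + 1) ((i + 1) + rest.length) with he
      have hge : i + 1 ≤ e := pvNhAux_ge rest (i + 1) _ (by omega)
      have hrange : List.range' i (e - i) = i :: List.range' (i + 1) (e - (i + 1)) := by
        have h2 : e - i = (e - (i + 1)) + 1 := by omega
        rw [h2, List.range'_succ]
      rw [hrange]
      simp only [pvScanTail, hh, Bool.false_eq_true, if_false, Option.isNone_none,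
        Bool.true_and, pvInsertAtLoop, hgd]
      cases hb : PySem.Str.startswith l "|---" with
      | true =>
        rw [if_pos rfl, if_pos rfl]
        rw [pvScanTail_some rest (i + 1) (i + 1), pvScanTail_fst, ← he]
      | false =>
        simp only [Bool.false_eq_true, if_false]
        rw [ih (i + 1) hdrop, ← he]

theorem pvHdrNotBar (l : String) (h : PySem.Str.startswith l "## " = true) :
    PySem.Str.startswith l "|---" = false := by
  by_contra hb
  rw [Bool.not_eq_false] at hb
  rw [PySem.Str.startswith_eq] at h hb
  rw [PySem.Chars.startswith_iff] at h hb
  obtain ⟨t1, ht1⟩ := h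
  obtain ⟨t2, ht2⟩ := hb
  rw [← ht2] at ht1
  simp at ht1

-- ===== VERDICT (by name: the statement is the Claim_ definition above) =====
theorem insert_after_table_header_py_spec : Claim_equal_insert_after_table_header_py := by
  intro lines title row _
  unfold Spec_insert_after_table_header_py insert_after_table_header_py insert_after_table_header_py_alt
  rw [pvSbFind_eq lines 0 lines.length title]
  cases hf : pvFindStart title lines 0 with
  | none => rfl
  | some s =>
    obtain ⟨-, hs, l, hl, hhdr⟩ := pvFindStart_lt lines 0 s title hf
    simp only [Nat.sub_zero] at hs hl
    have hlen : (s + 1) + (lines.drop (s + 1)).length = lines.length := by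
      simp only [List.length_drop]
      omega
    simp only [Nat.sub_zero]
    rw [pvScanTail_spec lines (lines.drop (s + 1)) (s + 1) rfl, hlen]
    set e := pvNhAux (lines.drop (s + 1)) (s + 1) lines.length with he
    have hge : s + 1 ≤ e := by
      rw [he, ← hlen]
      exact pvNhAux_ge _ _ _ (by omega)
    have hgd : lines.getD s "" = l := by
      rw [List.getD_eq_getElem?_getD, hl]
      rfl
    have hloop : pvInsertAtLoop lines e (List.range' s (e - s)) =
        pvInsertAtLoop lines e (List.range' (s + 1) (e - (s + 1))) := by
      have h2 : e - s = (e - (s + 1)) + 1 := by omega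
      rw [h2, List.range'_succ]
      simp only [pvInsertAtLoop, hgd, pvHdrNotBar l hhdr, Bool.false_eq_true, if_false]
    rw [hloop]
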